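-- pv_equiv track=rewrite | github.com/Naxesss/Aiess | bot/logic.py | forwards_leveled
-- ===== SOURCE A (Python) =====
-- def forwards_leveled(string: str) -> str:
--     """Returns the content after a given position in the string, until our parenthesis level reduces
--     (i.e. more closing parentheses are hit than opening ones)."""
--     read = ""
--     level = 0
--     for char in string:
--         if char == "(": level += 1
--         if char == ")": level -= 1
--         if level < 0:
--             break
--         read += char
--     return read
-- ===== SOURCE B (Python) =====
-- def forwards_leveled(string: str) -> str:
--     """Level-table decomposition: compute running parenthesis levels, then cut
--     at the first position where the level goes negative."""
--     levels = []
--     total = 0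
--     for c in string:
--         total += (c == "(") - (c == ")")
--         levels.append(total)
--     cut = next((i for i, lv in enumerate(levels) if lv < 0), len(string))
--     return string[:cut]
-- ===== Notes on version B (the rewrite author's own statement) =====
-- stated objective: alternative
-- what changed: Instead of accumulating the result string character-by-character with a break, B builds the running parenthesis-level table, finds the first index where the level is negative, and slices the string there.
import Mathlib
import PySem

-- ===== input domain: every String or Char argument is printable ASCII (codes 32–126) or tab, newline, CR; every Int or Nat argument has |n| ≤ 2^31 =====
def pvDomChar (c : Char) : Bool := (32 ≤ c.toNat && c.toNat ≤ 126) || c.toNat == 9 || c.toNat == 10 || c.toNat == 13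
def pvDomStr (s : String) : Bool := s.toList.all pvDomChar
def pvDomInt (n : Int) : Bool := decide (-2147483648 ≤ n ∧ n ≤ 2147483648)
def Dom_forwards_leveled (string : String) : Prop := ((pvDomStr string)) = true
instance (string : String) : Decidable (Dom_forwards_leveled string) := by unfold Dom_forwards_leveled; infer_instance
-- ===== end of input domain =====

-- B replaces A's character-by-character accumulate-with-break by a level table plus a slice at
-- the first negative level (alternative decomposition, same O(n) cost).


-- ===== PORT A =====
-- loop of A: two sequential ifs update the level, break before appending when level < 0
def flGoA : List Char → Int → List Char
  | [], _ => []
  | c :: rest, level =>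
    let level := if c = '(' then level + 1 else level
    let level := if c = ')' then level - 1 else level
    if level < 0 then [] else c :: flGoA rest level

def forwards_leveled (string : String) : String :=
  String.ofList (flGoA string.toList 0)

-- ===== PORT B =====
-- running-level table: levels[i] = parenthesis level after reading string[0..i]
def flLevels : List Char → Int → List Int
  | [], _ => []
  | c :: rest, total =>
    let total := total + ((if c = '(' then (1 : Int) else 0) - (if c = ')' then 1 else 0))
    total :: flLevels rest total

-- next((i for i, lv in enumerate(levels) if lv < 0), default): i starts at the given index
def flCut : List Int → Nat → Nat
  | [], i => i
  | lv :: rest, i => if lv < 0 then i else flCut rest (i + 1)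

def forwards_leveled_alt (string : String) : String :=
  String.ofList (string.toList.take (flCut (flLevels string.toList 0) 0))

-- ===== PRECONDITION & SPEC =====
def Spec_forwards_leveled (string : String) (out : String) : Prop := out = forwards_leveled_alt string
instance (string : String) (out : String) : Decidable (Spec_forwards_leveled string out) := by unfold Spec_forwards_leveled; infer_instance

-- ===== CLAIM (what is proved, stated in full; the proofs are below) =====
def Claim_equal_forwards_leveled : Prop := ∀ (string : String), Dom_forwards_leveled string → Spec_forwards_leveled string (forwards_leveled string)

-- ===== LEMMAS AND PROOFS =====
theorem flCut_shift (L : List Int) (i : Nat) : flCut L i = i + flCut L 0 := by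
  induction L generalizing i with
  | nil => simp [flCut]
  | cons lv rest ih =>
    simp only [flCut]
    split
    · simp
    · rw [ih (i + 1), ih 1]; omega

theorem flGoA_eq_take (l : List Char) (level : Int) :
    flGoA l level = l.take (flCut (flLevels l level) 0) := by
  induction l generalizing level with
  | nil => simp [flGoA, flLevels, flCut]
  | cons c rest ih =>
    have hne : ('(' : Char) ≠ ')' := by decide
    have hlv :
        (if c = ')' then (if c = '(' then level + 1 else level) - 1
         else (if c = '(' then level + 1 else level))
        = level + ((if c = '(' then (1 : Int) else 0) - (if c = ')' then 1 else 0)) := by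
      by_cases h1 : c = '(' <;> by_cases h2 : c = ')' <;> simp_all <;> omega
    simp only [flGoA, flLevels, flCut]
    rw [hlv]
    set d := ((if c = '(' then (1 : Int) else 0) - (if c = ')' then 1 else 0)) with hd
    by_cases h : level + d < 0
    · simp [h]
    · simp [h, flCut_shift _ 1, ih, Nat.add_comm]

theorem forwards_leveled_spec : Claim_equal_forwards_leveled := by
  intro s _
  unfold Spec_forwards_leveled forwards_leveled forwards_leveled_alt
  rw [flGoA_eq_take]
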